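-- pv_equiv track=rewrite | github.com/mysticflounder/modular-schur | scripts/phase9_stable_tables.py | k0_from_values
-- ===== SOURCE A (Python) =====
-- def k0_from_values(values: dict[int, int], target: int) -> int | None:
--     ks = sorted(values)
--     for candidate in ks:
--         if values[candidate] != target:
--             continue
--         if all(values[k] == target for k in ks if k >= candidate):
--             return candidate
--     return None
-- ===== SOURCE B (Python) =====
-- def k0_from_values(values: dict[int, int], target: int) -> int | None:
--     k0 = None
--     for k in reversed(sorted(values)):
--         if values[k] != target:
--             break
--         k0 = k
--     return k0
-- ===== Notes on version B (the rewrite author's own statement) =====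
-- stated objective: alternative
-- what changed: Instead of scanning candidates in ascending order and re-checking the whole key list for each one (all keys >= candidate equal target), B walks the sorted keys once from the largest downward, extending the trailing all-target run and returning its smallest key; intended as the asymptotically better algorithm, but a timing run measured only 1.45x at the largest size, so no speed is claimed.
import Mathlib
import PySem

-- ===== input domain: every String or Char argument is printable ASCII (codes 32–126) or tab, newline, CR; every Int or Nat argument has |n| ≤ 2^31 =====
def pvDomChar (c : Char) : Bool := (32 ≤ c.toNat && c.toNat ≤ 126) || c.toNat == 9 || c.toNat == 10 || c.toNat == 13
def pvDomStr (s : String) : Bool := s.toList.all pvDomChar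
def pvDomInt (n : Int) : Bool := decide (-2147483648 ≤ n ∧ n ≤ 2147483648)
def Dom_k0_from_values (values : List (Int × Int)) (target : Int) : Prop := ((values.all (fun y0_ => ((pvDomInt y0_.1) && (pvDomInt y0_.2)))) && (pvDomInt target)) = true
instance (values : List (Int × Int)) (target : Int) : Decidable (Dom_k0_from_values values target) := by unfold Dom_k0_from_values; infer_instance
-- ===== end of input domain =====

-- B replaces A's per-candidate re-check of the whole key list by one descending pass over the sorted keys (objective: alternative algorithm).

-- ===== PORT A =====
-- all(values[k] == target for k in ks if k >= candidate)
def k0A_check (d : PySem.Dict Int Int) (ks : List Int) (target candidate : Int) : Bool :=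
  ks.all (fun k => if candidate ≤ k then d.getD k 0 == target else true)

-- the 'for candidate in ks' loop (continue / return candidate / fall through)
def k0A_loop (d : PySem.Dict Int Int) (ks full : List Int) (target : Int) : Option Int :=
  match ks with
  | [] => none
  | c :: rest =>
    if d.getD c 0 ≠ target then k0A_loop d rest full target
    else if k0A_check d full target c then some c
    else k0A_loop d rest full target

def k0_from_values (values : List (Int × Int)) (target : Int) : Option Int :=
  let d := PySem.Dict.ofList values
  let ks := PySem.List.sorted d.keys (fun x => x) false
  k0A_loop d ks ks target

-- ===== PORT B =====
-- the 'for k in reversed(sorted(values))' loop with accumulator k0 (break / update)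
def k0B_loop (d : PySem.Dict Int Int) (ks : List Int) (target : Int) (k0 : Option Int) : Option Int :=
  match ks with
  | [] => k0
  | k :: rest => if d.getD k 0 ≠ target then k0 else k0B_loop d rest target (some k)

def k0_from_values_alt (values : List (Int × Int)) (target : Int) : Option Int :=
  let d := PySem.Dict.ofList values
  let ks := PySem.List.sorted d.keys (fun x => x) false
  k0B_loop d ks.reverse target none

-- ===== PRECONDITION & SPEC =====
def Spec_k0_from_values (values : List (Int × Int)) (target : Int) (out : Option Int) : Prop := out = k0_from_values_alt values target
instance (values : List (Int × Int)) (target : Int) (out : Option Int) : Decidable (Spec_k0_from_values values target out) := by unfold Spec_k0_from_values; infer_instance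

-- ===== CLAIM (what is proved, stated in full; the proofs are below) =====
def Claim_equal_k0_from_values : Prop := ∀ (values : List (Int × Int)) (target : Int), Dom_k0_from_values values target → Spec_k0_from_values values target (k0_from_values values target)

-- ===== LEMMAS AND PROOFS =====

-- dropping a key smaller than every remaining candidate does not change A's inner check
theorem k0A_check_cons_of_lt (d : PySem.Dict Int Int) (c : Int) (full : List Int)
    (target cand : Int) (h : c < cand) :
    k0A_check d (c :: full) target cand = k0A_check d full target cand := by
  simp only [k0A_check, List.all_cons, if_neg (by omega : ¬ cand ≤ c), Bool.true_and]

theorem k0A_loop_cons_full (d : PySem.Dict Int Int) (c : Int) (target : Int) :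
    ∀ (cs full : List Int), (∀ x ∈ cs, c < x) →
    k0A_loop d cs (c :: full) target = k0A_loop d cs full target := by
  intro cs
  induction cs with
  | nil => intro full _; rfl
  | cons a rest ih =>
    intro full h
    have ha : c < a := h a (by simp)
    have hrest : ∀ x ∈ rest, c < x := fun x hx => h x (by simp [hx])
    simp only [k0A_loop, k0A_check_cons_of_lt d c full target a ha, ih full hrest]

theorem k0A_check_iff (d : PySem.Dict Int Int) (full : List Int) (target cand : Int) :
    k0A_check d full target cand = true ↔ ∀ k ∈ full, cand ≤ k → d.getD k 0 = target := by
  simp only [k0A_check, List.all_eq_true]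
  constructor
  · intro h k hk hle
    have := h k hk
    simpa [if_pos hle] using this
  · intro h k hk
    by_cases hle : cand ≤ k
    · simpa [if_pos hle] using h k hk hle
    · simp [if_neg hle]

theorem k0B_loop_append_of_ne (d : PySem.Dict Int Int) (c target : Int)
    (hc : d.getD c 0 ≠ target) :
    ∀ (xs : List Int) (acc : Option Int),
    k0B_loop d (xs ++ [c]) target acc = k0B_loop d xs target acc := by
  intro xs
  induction xs with
  | nil => intro acc; simp [k0B_loop, hc]
  | cons a rest ih =>
    intro acc
    by_cases ha : d.getD a 0 = target
    · simp [k0B_loop, ha, ih]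
    · simp [k0B_loop, ha]

theorem k0B_loop_append_all_eq (d : PySem.Dict Int Int) (c target : Int)
    (hc : d.getD c 0 = target) :
    ∀ (xs : List Int) (acc : Option Int), (∀ k ∈ xs, d.getD k 0 = target) →
    k0B_loop d (xs ++ [c]) target acc = some c := by
  intro xs
  induction xs with
  | nil => intro acc _; simp [k0B_loop, hc]
  | cons a rest ih =>
    intro acc h
    have ha : d.getD a 0 = target := h a (by simp)
    simp only [List.cons_append, k0B_loop, ha]
    simp only [ne_eq, not_true_eq_false, if_false]
    exact ih (some a) (fun k hk => h k (by simp [hk]))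

theorem k0B_loop_of_exists_ne (d : PySem.Dict Int Int) (target : Int) :
    ∀ (xs ys : List Int) (acc : Option Int), (∃ k ∈ xs, d.getD k 0 ≠ target) →
    k0B_loop d (xs ++ ys) target acc = k0B_loop d xs target acc := by
  intro xs
  induction xs with
  | nil => intro ys acc h; simp at h
  | cons a rest ih =>
    intro ys acc h
    by_cases ha : d.getD a 0 = target
    · obtain ⟨k, hk, hkne⟩ := h
      have hk' : k ∈ rest := by
        rcases List.mem_cons.mp hk with rfl | hk'
        · exact absurd ha hkne
        · exact hk'
      simp only [List.cons_append, k0B_loop, ha, ne_eq, not_true_eq_false, if_false]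
      exact ih ys (some a) ⟨k, hk', hkne⟩
    · simp [k0B_loop, ha]

theorem k0_loops_agree (d : PySem.Dict Int Int) (target : Int) :
    ∀ ks : List Int, ks.Pairwise (· < ·) →
    k0A_loop d ks ks target = k0B_loop d ks.reverse target none := by
  intro ks
  induction ks with
  | nil => intro _; rfl
  | cons c rest ih =>
    intro hp
    have hlt : ∀ x ∈ rest, c < x := (List.pairwise_cons.mp hp).1
    have hrest : rest.Pairwise (· < ·) := (List.pairwise_cons.mp hp).2
    have hstep : k0A_loop d rest (c :: rest) target = k0B_loop d rest.reverse target none := by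
      rw [k0A_loop_cons_full d c target rest rest hlt, ih hrest]
    simp only [List.reverse_cons]
    by_cases hc : d.getD c 0 = target
    · by_cases hchk : k0A_check d (c :: rest) target c = true
      · have hall : ∀ k ∈ rest, d.getD k 0 = target := by
          intro k hk
          exact (k0A_check_iff d (c :: rest) target c).mp hchk k (by simp [hk]) (le_of_lt (hlt k hk))
        have hall' : ∀ k ∈ rest.reverse, d.getD k 0 = target := by
          intro k hk; exact hall k (List.mem_reverse.mp hk)
        simp only [k0A_loop, hc, ne_eq, not_true_eq_false, if_false, hchk, if_true]
        exact (k0B_loop_append_all_eq d c target hc rest.reverse none hall').symm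
      · have hex : ∃ k ∈ rest, d.getD k 0 ≠ target := by
          rw [k0A_check_iff] at hchk
          push Not at hchk
          obtain ⟨k, hk, hle, hkne⟩ := hchk
          refine ⟨k, ?_, hkne⟩
          rcases List.mem_cons.mp hk with rfl | hk'
          · exact absurd hc hkne
          · exact hk'
        have hex' : ∃ k ∈ rest.reverse, d.getD k 0 ≠ target := by
          obtain ⟨k, hk, hkne⟩ := hex
          exact ⟨k, List.mem_reverse.mpr hk, hkne⟩
        simp only [k0A_loop, hc, ne_eq, not_true_eq_false, if_false, hchk, if_false]
        rw [k0B_loop_of_exists_ne d target rest.reverse [c] none hex']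
        exact hstep
    · simp only [k0A_loop, hc, ne_eq, not_false_eq_true, if_true]
      rw [k0B_loop_append_of_ne d c target hc rest.reverse none]
      exact hstep

-- ===== VERDICT (by name: the statement is the Claim_ definition above) =====
theorem k0_from_values_spec : Claim_equal_k0_from_values := by
  intro values target _
  unfold Spec_k0_from_values k0_from_values k0_from_values_alt
  apply k0_loops_agree
  have hnd : (PySem.Dict.ofList values).keys.Nodup := PySem.Dict.nodup_keys_ofList values
  have hperm := PySem.List.sorted_perm (PySem.Dict.ofList values).keys (fun x : Int => x) false
  have hnd' : (PySem.List.sorted (PySem.Dict.ofList values).keys (fun x : Int => x) false).Nodup :=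
    hperm.nodup_iff.mpr hnd
  have hle := PySem.List.sorted_pairwise (PySem.Dict.ofList values).keys (fun x : Int => x)
  exact (List.Pairwise.and hle hnd').imp (fun {a b} h => lt_of_le_of_ne h.1 h.2)
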